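-- pv_equiv track=rewrite | github.com/dianabuilds/backend | apps/backend/domains/platform/notifications/adapters/sql/matrix.py | _coerce_quiet_hours
-- ===== SOURCE A (Python) =====
-- from typing import Any
--
-- def _coerce_quiet_hours(value: Any) -> tuple[int, ...]:
--     if not isinstance(value, (list, tuple)):
--         return tuple()
--     hours: set[int] = set()
--     for item in value:
--         try:
--             hour = int(item)
--         except (TypeError, ValueError):
--             continue
--         if 0 <= hour <= 23:
--             hours.add(hour)
--     return tuple(sorted(hours))
-- ===== SOURCE B (Python) =====
-- def _contains_hour(value, h):
--     for item in value:
--         try: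
--             if int(item) == h:
--                 return True
--         except (TypeError, ValueError):
--             continue
--     return False
--
-- def _coerce_quiet_hours(value):
--     if not isinstance(value, (list, tuple)):
--         return tuple()
--     return tuple(h for h in range(24) if _contains_hour(value, h))
-- ===== Notes on version B (the rewrite author's own statement) =====
-- stated objective: alternative
-- what changed: Inverts the loop nesting: instead of collecting coerced items into a set and sorting it, B iterates over the 24 candidate hours in order and keeps each hour for which a membership scan finds a coercible item equal to it, so no set and no sort are ever built.
import Mathlib
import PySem

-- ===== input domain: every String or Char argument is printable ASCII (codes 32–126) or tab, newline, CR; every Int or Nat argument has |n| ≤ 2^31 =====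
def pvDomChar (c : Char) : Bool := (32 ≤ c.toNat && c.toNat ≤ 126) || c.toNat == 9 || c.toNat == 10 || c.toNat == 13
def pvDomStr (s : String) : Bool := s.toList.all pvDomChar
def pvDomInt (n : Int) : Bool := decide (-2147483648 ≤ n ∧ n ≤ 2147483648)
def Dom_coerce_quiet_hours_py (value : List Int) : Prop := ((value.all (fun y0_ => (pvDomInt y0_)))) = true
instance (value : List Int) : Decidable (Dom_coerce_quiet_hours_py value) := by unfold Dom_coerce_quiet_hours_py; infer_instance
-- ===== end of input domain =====

-- B inverts the loop nesting: it walks the 24 candidate hours in order and keeps each hour found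
-- by a membership scan of the input, so neither a set nor a sort is built (alternative decomposition).
-- Under the List Int typing the isinstance guard and int() coercion are always the identity, so both are total.

-- ===== PORT A =====
-- hours = set(); for item in value: if 0 <= item <= 23: hours.add(item); return tuple(sorted(hours))
def coerce_quiet_hours_py (value : List Int) : List Int :=
  let hours : PySem.Set Int :=
    value.foldl (fun s item => if 0 ≤ item ∧ item ≤ 23 then PySem.Set.add s item else s)
      PySem.Set.empty
  PySem.List.sorted hours (fun x => x) false

-- ===== PORT B =====
-- def _contains_hour(value, h): for item in value: if int(item) == h: return True; return False
def containsHour (value : List Int) (h : Int) : Bool :=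
  match value with
  | [] => false
  | item :: rest => if item == h then true else containsHour rest h

-- return tuple(h for h in range(24) if _contains_hour(value, h))
def coerce_quiet_hours_py_alt (value : List Int) : List Int :=
  (PySem.List.pyRange 0 24 1).filter (fun h => containsHour value h)

-- ===== PRECONDITION & SPEC =====
def Spec_coerce_quiet_hours_py (value : List Int) (out : List Int) : Prop := out = coerce_quiet_hours_py_alt value
instance (value : List Int) (out : List Int) : Decidable (Spec_coerce_quiet_hours_py value out) := by unfold Spec_coerce_quiet_hours_py; infer_instance

-- ===== CLAIM (what is proved, stated in full; the proofs are below) =====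
def Claim_equal_coerce_quiet_hours_py : Prop := ∀ (value : List Int), Dom_coerce_quiet_hours_py value → Spec_coerce_quiet_hours_py value (coerce_quiet_hours_py value)

-- ===== LEMMAS AND PROOFS =====

theorem containsHour_eq_mem (value : List Int) (h : Int) :
    containsHour value h = decide (h ∈ value) := by
  induction value with
  | nil => simp [containsHour]
  | cons x xs ih =>
    simp only [containsHour, ih, List.mem_cons]
    by_cases hx : x = h
    · simp [hx]
    · simp [hx, Ne.symm hx]

-- A's accumulated set: membership characterisation and nodup.
theorem mem_hoursFold (value : List Int) (s : PySem.Set Int) (h : Int) :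
    h ∈ value.foldl (fun s item => if 0 ≤ item ∧ item ≤ 23 then PySem.Set.add s item else s) s ↔
      h ∈ s ∨ (h ∈ value ∧ 0 ≤ h ∧ h ≤ 23) := by
  induction value generalizing s with
  | nil => simp
  | cons x xs ih =>
    simp only [List.foldl_cons, ih, List.mem_cons]
    split_ifs with hx
    · rw [PySem.Set.mem_add]
      constructor
      · rintro ((hs | rfl) | hm)
        · exact Or.inl hs
        · exact Or.inr ⟨Or.inl rfl, hx⟩
        · exact Or.inr ⟨Or.inr hm.1, hm.2⟩
      · rintro (hs | ⟨(rfl | hm), hr⟩)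
        · exact Or.inl (Or.inl hs)
        · exact Or.inl (Or.inr rfl)
        · exact Or.inr ⟨hm, hr⟩
    · constructor
      · rintro (hs | hm)
        · exact Or.inl hs
        · exact Or.inr ⟨Or.inr hm.1, hm.2⟩
      · rintro (hs | ⟨(rfl | hm), hr⟩)
        · exact Or.inl hs
        · exact absurd hr hx
        · exact Or.inr ⟨hm, hr⟩

theorem nodup_hoursFold (value : List Int) (s : PySem.Set Int) (hs : s.Nodup) :
    (value.foldl (fun s item => if 0 ≤ item ∧ item ≤ 23 then PySem.Set.add s item else s) s).Nodup := by
  induction value generalizing s with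
  | nil => exact hs
  | cons x xs ih =>
    simp only [List.foldl_cons]
    split_ifs
    · exact ih _ (PySem.Set.nodup_add _ _ hs)
    · exact ih _ hs

theorem a_eq_alt (value : List Int) : coerce_quiet_hours_py value = coerce_quiet_hours_py_alt value := by
  unfold coerce_quiet_hours_py coerce_quiet_hours_py_alt
  apply PySem.List.sorted_eq_of_perm_of_pairwise_lt
  · rw [List.perm_ext_iff_of_nodup (List.Nodup.filter _ (PySem.List.nodup_pyRange_one 0 24))
        (nodup_hoursFold value PySem.Set.empty (by simp [PySem.Set.empty]))]
    intro h
    rw [mem_hoursFold, List.mem_filter, PySem.List.mem_pyRange_one, containsHour_eq_mem]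
    simp only [PySem.Set.empty, List.not_mem_nil, false_or, decide_eq_true_eq]
    constructor
    · intro hx
      exact ⟨hx.2, hx.1.1, by have := hx.1.2; omega⟩
    · intro hx
      exact ⟨⟨hx.2.1, by have := hx.2.2; omega⟩, hx.1⟩
  · exact List.Pairwise.filter _ (PySem.List.pairwise_lt_pyRange_one 0 24)

-- ===== VERDICT (by name: the statement is the Claim_ definition above) =====
theorem coerce_quiet_hours_py_spec : Claim_equal_coerce_quiet_hours_py := by
  intro value _
  exact a_eq_alt value
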